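-- pv_equiv track=rewrite | github.com/benkl/wfc_2D_B3D | wfc_2d.py | blender_transitions
-- ===== SOURCE A (Python) =====
-- def blender_transitions(wfc_result_array):
--     output_tiles = []
--     for x in range(0, len(wfc_result_array)):
--         l_len = len(wfc_result_array[0])
--         for y in range(0, l_len):
--             blender_tile = ['L', 'L', 'L', 'L']
--             if x - 1 >= 0:
--                 blender_tile[0] = wfc_result_array[x-1][y]
--             if y + 1 < l_len:
--                 blender_tile[1] = wfc_result_array[x][y+1]
--             if x + 1 < len(wfc_result_array):
--                 blender_tile[2] = wfc_result_array[x+1][y]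
--             if y - 1 >= 0:
--                 blender_tile[3] = wfc_result_array[x][y-1]
--             output_tiles.append(blender_tile)
--
--     return output_tiles
-- ===== SOURCE B (Python) =====
-- def blender_transitions(wfc_result_array):
--     n = len(wfc_result_array)
--     if n == 0:
--         return []
--     m = len(wfc_result_array[0])
--     # sentinel border: pad the grid with a ring of 'L', then read the four
--     # neighbors unconditionally (up, right, down, left)
--     pad = [['L'] * (m + 2) for _ in range(n + 2)]
--     for i in range(n):
--         row = wfc_result_array[i]
--         for j in range(m):
--             pad[i + 1][j + 1] = row[j]
--     out = []
--     for x in range(n):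
--         for y in range(m):
--             out.append([pad[x][y + 1], pad[x + 1][y + 2],
--                         pad[x + 2][y + 1], pad[x + 1][y]])
--     return out
-- ===== Notes on version B (the rewrite author's own statement) =====
-- stated objective: simpler
-- what changed: B replaces A's four boundary if-branches per cell by building a padded (n+2)x(m+2) array with a sentinel 'L' border once, then reads the four neighbors unconditionally.
import Mathlib
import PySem

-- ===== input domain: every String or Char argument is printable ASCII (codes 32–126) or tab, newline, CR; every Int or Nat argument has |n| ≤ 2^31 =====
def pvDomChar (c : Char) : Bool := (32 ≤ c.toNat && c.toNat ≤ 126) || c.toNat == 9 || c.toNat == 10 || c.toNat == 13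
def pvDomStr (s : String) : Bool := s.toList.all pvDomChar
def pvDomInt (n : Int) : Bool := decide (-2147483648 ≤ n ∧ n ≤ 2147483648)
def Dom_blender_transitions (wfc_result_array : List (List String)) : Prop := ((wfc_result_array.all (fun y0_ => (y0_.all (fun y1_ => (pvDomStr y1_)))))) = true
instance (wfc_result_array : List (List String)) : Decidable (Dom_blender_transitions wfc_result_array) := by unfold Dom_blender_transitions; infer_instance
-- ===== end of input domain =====

-- B replaces A's four per-cell boundary branches by one sentinel 'L' border (a padded
-- (n+2)x(m+2) array built once); equal return value on every rectangular-enough grid (Pre_).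

-- ===== PORT A =====
def blender_transitions (wfc_result_array : List (List String)) : List (List String) :=
  (List.range wfc_result_array.length).foldl (fun output_tiles x =>
    let l_len := (wfc_result_array.headD []).length
    (List.range l_len).foldl (fun output_tiles y =>
      let t0 := if 1 ≤ x then ((wfc_result_array.getD (x - 1) []).getD y "L") else "L"
      let t1 := if y + 1 < l_len then ((wfc_result_array.getD x []).getD (y + 1) "L") else "L"
      let t2 := if x + 1 < wfc_result_array.length then ((wfc_result_array.getD (x + 1) []).getD y "L") else "L"
      let t3 := if 1 ≤ y then ((wfc_result_array.getD x []).getD (y - 1) "L") else "L"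
      output_tiles ++ [[t0, t1, t2, t3]]) output_tiles) []

-- ===== PORT B =====
-- pad row for an original row r: 'L', the first m entries of r, 'L'
def padRow (m : Nat) (r : List String) : List String :=
  "L" :: (List.range m).map (fun j => r.getD j "L") ++ ["L"]

def blender_transitions_alt (wfc_result_array : List (List String)) : List (List String) :=
  match wfc_result_array with
  | [] => []
  | r0 :: _ =>
    let n := wfc_result_array.length
    let m := r0.length
    let border := List.replicate (m + 2) "L"
    let pad := border :: wfc_result_array.map (padRow m) ++ [border]
    (List.range n).foldl (fun out x =>
      (List.range m).foldl (fun out y =>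
        out ++ [[(pad.getD x []).getD (y + 1) "L",
                 (pad.getD (x + 1) []).getD (y + 2) "L",
                 (pad.getD (x + 2) []).getD (y + 1) "L",
                 (pad.getD (x + 1) []).getD y "L"]]) out) []

-- ===== PRECONDITION & SPEC =====
-- Pre_ excludes ragged grids with a row shorter than the first row, on which the Python A
-- raises IndexError (and the Python B raises IndexError on the same inputs).
def Pre_blender_transitions (wfc_result_array : List (List String)) : Prop :=
  ∀ r ∈ wfc_result_array, (wfc_result_array.headD []).length ≤ r.length
instance (wfc_result_array : List (List String)) : Decidable (Pre_blender_transitions wfc_result_array) := by unfold Pre_blender_transitions; infer_instance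
def pvWitness_blender_transitions : List (List String) := [["A", "B"], ["L", "A"]]

def Spec_blender_transitions (wfc_result_array : List (List String)) (out : List (List String)) : Prop := out = blender_transitions_alt wfc_result_array
instance (wfc_result_array : List (List String)) (out : List (List String)) : Decidable (Spec_blender_transitions wfc_result_array out) := by unfold Spec_blender_transitions; infer_instance

-- ===== CLAIM (what is proved, stated in full; the proofs are below) =====
def Claim_equal_blender_transitions : Prop := ∀ (wfc_result_array : List (List String)), Dom_blender_transitions wfc_result_array → Pre_blender_transitions wfc_result_array → Spec_blender_transitions wfc_result_array (blender_transitions wfc_result_array)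

-- ===== LEMMAS AND PROOFS =====

theorem getD_replicate_L (k m : Nat) : (List.replicate m "L").getD k "L" = "L" := by
  simp [List.getD, List.getElem?_replicate]
  split <;> simp

theorem getD_padRow_succ (m j : Nat) (r : List String) (hj : j < m) :
    (padRow m r).getD (j + 1) "L" = r.getD j "L" := by
  simp [padRow, List.getD]
  rw [List.getElem?_append_left (by simpa using hj)]
  simp [hj]

theorem getD_padRow_last (m : Nat) (r : List String) : (padRow m r).getD (m + 1) "L" = "L" := by
  simp [padRow, List.getD]

theorem pad_getD_mid (g : List (List String)) (m j : Nat) (hj : j < g.length) :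
    (List.replicate (m + 2) "L" :: g.map (padRow m) ++ [List.replicate (m + 2) "L"]).getD (j + 1) [] = padRow m (g.getD j []) := by
  simp only [List.getD]
  rw [List.getElem?_append_left (by simp; omega)]
  simp [List.getElem?_eq_getElem hj]

theorem pad_getD_last (g : List (List String)) (m : Nat) :
    (List.replicate (m + 2) "L" :: g.map (padRow m) ++ [List.replicate (m + 2) "L"]).getD (g.length + 1) [] = List.replicate (m + 2) "L" := by
  simp only [List.getD]
  rw [List.getElem?_append_right (by simp)]
  simp

theorem blender_transitions_spec_aux : ∀ (g : List (List String)),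
    blender_transitions g = blender_transitions_alt g := by
  intro g
  cases g with
  | nil => rfl
  | cons r0 rest =>
  unfold blender_transitions blender_transitions_alt
  simp only [List.headD_cons, PySem.List.foldl_append_eq_flatMap, List.nil_append]
  apply List.flatMap_congr
  intro x hx
  apply List.flatMap_congr
  intro y hy
  rw [List.mem_range] at hx hy
  congr 1
  congr 1
  · -- up neighbor: pad[x][y+1]
    match x, hx with
    | 0, _ =>
      have hle : y ≤ r0.length := Nat.le_of_lt hy
      simp [List.getD, hle]
    | (j+1), hx =>
      rw [pad_getD_mid (r0 :: rest) r0.length j (Nat.lt_of_succ_lt hx),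
          getD_padRow_succ r0.length y _ hy]
      simp
  congr 1
  · -- right neighbor: pad[x+1][y+2]
    rw [pad_getD_mid (r0 :: rest) r0.length x hx]
    by_cases h2 : y + 1 < r0.length
    · rw [show y + 2 = (y + 1) + 1 from rfl, getD_padRow_succ r0.length (y + 1) _ h2]
      simp [h2]
    · rw [show y + 2 = r0.length + 1 by omega, getD_padRow_last]
      simp [h2]
  congr 1
  · -- down neighbor: pad[x+2][y+1]
    by_cases h2 : x + 1 < (r0 :: rest).length
    · rw [show x + 2 = (x + 1) + 1 from rfl, pad_getD_mid (r0 :: rest) r0.length (x + 1) h2,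
          getD_padRow_succ r0.length y _ hy]
      simp only [h2, if_true, List.getD]
    · rw [show x + 2 = (r0 :: rest).length + 1 by simp at hx h2 ⊢; omega,
          pad_getD_last, getD_replicate_L]
      simp only [h2, if_false]
  · -- left neighbor: pad[x+1][y]
    rw [pad_getD_mid (r0 :: rest) r0.length x hx]
    match y with
    | 0 => simp [padRow]
    | (j+1) =>
      rw [getD_padRow_succ r0.length j _ (by omega)]
      simp

-- ===== VERDICT (by name: the statement is the Claim_ definition above) =====
theorem blender_transitions_spec : Claim_equal_blender_transitions := by
  intro g _ _
  unfold Spec_blender_transitions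
  exact blender_transitions_spec_aux g
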